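-- pv_equiv track=rewrite | github.com/changpil/pyPractice | 2. Coding Interviews/Sessions/InterviewQuestions/trace-path.py | bfs
-- ===== SOURCE A (Python) =====
-- import collections
--
-- def bfs(planes, state):
--     result = []
--     visited = set()
--     queue = collections.deque()
--     queue.append(state)
--     visited.add(state)
--     while queue:
--         source = queue.pop()
--         destination = planes[source] if source in planes else None
--         if destination and destination not in visited:
--             result.append([source, destination])
--             visited.add(destination)
--             queue.append(destination)
--     return result
-- ===== SOURCE B (Python) =====
-- def bfs(planes, state):
--     def extend(chain):
--         dest = planes.get(chain[-1])
--         if dest and dest not in chain: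
--             return extend(chain + [dest])
--         return chain
--     nodes = extend([state])
--     return [[a, b] for a, b in zip(nodes, nodes[1:])]
-- ===== Notes on version B (the rewrite author's own statement) =====
-- stated objective: alternative
-- what changed: Replaces the deque worklist and the visited set with a recursive builder of the chain of nodes (the chain list itself serves as the visited structure), and produces the result afterwards in a second stage by zipping adjacent chain nodes into pairs instead of appending pairs inside the loop.
import Mathlib
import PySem

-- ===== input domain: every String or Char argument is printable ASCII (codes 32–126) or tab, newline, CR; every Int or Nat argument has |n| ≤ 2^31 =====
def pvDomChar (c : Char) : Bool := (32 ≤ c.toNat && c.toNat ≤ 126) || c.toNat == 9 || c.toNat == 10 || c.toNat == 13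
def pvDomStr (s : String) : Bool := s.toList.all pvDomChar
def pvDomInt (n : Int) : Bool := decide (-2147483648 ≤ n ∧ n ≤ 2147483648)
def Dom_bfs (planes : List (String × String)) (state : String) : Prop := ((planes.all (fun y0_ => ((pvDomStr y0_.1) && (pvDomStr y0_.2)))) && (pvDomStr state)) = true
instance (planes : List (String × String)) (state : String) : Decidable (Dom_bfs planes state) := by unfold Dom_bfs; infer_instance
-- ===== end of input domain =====

-- B rebuilds the same value in two stages: a recursive builder of the chain of nodes (the
-- chain list doubles as the visited structure), then adjacent nodes are zipped into pairs.

-- ===== PORT A =====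
-- A's deque is used right-append / right-pop; it is represented as a List with the RIGHT end
-- at the HEAD (append = cons, pop = head), which is exact for this usage.
-- Fuel: each productive iteration adds a distinct dict value to visited, so
-- planes.length + 1 iterations always suffice.
def bfsLoop (d : PySem.Dict String String) (fuel : Nat) (result : List (List String))
    (visited : PySem.Set String) (queue : List String) : List (List String) :=
  match fuel, queue with
  | _, [] => result
  | 0, _ => result
  | f + 1, source :: rest =>
    let destination := d.get? source   -- planes[source] if source in planes else None
    match destination with
    | some dest =>
      if dest ≠ "" ∧ ¬ (dest ∈ visited) then   -- destination truthy and not in visited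
        bfsLoop d f (result ++ [[source, dest]]) (visited.add dest) (dest :: rest)
      else
        bfsLoop d f result visited rest
    | none => bfsLoop d f result visited rest

def bfs (planes : List (String × String)) (state : String) : List (List String) :=
  bfsLoop (PySem.Dict.ofList planes) (planes.length + 1) []
    (PySem.Set.add PySem.Set.empty state) [state]

-- ===== PORT B =====
-- chain[-1] is ported as getLastD "" — exact here because chain is never empty.
-- Fuel: each recursive call appends a distinct dict value not yet in the chain, so
-- planes.length + 1 levels always suffice (same fuel as A's port).
def extendChain (d : PySem.Dict String String) (fuel : Nat) (chain : List String) : List String :=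
  match fuel with
  | 0 => chain
  | f + 1 =>
    match d.get? (chain.getLastD "") with   -- planes.get(chain[-1])
    | some dest =>
      if dest ≠ "" ∧ ¬ (dest ∈ chain) then extendChain d f (chain ++ [dest]) else chain
    | none => chain

def bfs_alt (planes : List (String × String)) (state : String) : List (List String) :=
  let nodes := extendChain (PySem.Dict.ofList planes) (planes.length + 1) [state]
  List.zipWith (fun a b => [a, b]) nodes nodes.tail   -- zip(nodes, nodes[1:]) into pairs

-- ===== PRECONDITION & SPEC =====
def Spec_bfs (planes : List (String × String)) (state : String) (out : List (List String)) : Prop := out = bfs_alt planes state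
instance (planes : List (String × String)) (state : String) (out : List (List String)) : Decidable (Spec_bfs planes state out) := by unfold Spec_bfs; infer_instance

-- ===== CLAIM =====
def Claim_equal_bfs : Prop := ∀ (planes : List (String × String)) (state : String), Dom_bfs planes state → Spec_bfs planes state (bfs planes state)

-- ===== LEMMAS AND PROOFS =====

def pairsOf (c : List String) : List (List String) :=
  List.zipWith (fun a b => [a, b]) c c.tail

theorem pairsOf_append (c : List String) (x : String) (h : c ≠ []) :
    pairsOf (c ++ [x]) = pairsOf c ++ [[c.getLastD "", x]] := by
  induction c with
  | nil => exact absurd rfl h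
  | cons a t ih =>
    cases t with
    | nil => rfl
    | cons b t' =>
      simp only [pairsOf, List.cons_append, List.zipWith, List.tail] at ih ⊢
      have := ih (by simp)
      
      simp [this, List.getLastD]

-- A's loop, started with a singleton queue holding the chain's last node, the chain's pairs
-- as result and a visited set with the chain's members, equals B's staged computation.
theorem loop_eq_chain (d : PySem.Dict String String) (fuel : Nat) :
    ∀ (chain : List String) (visited : PySem.Set String), chain ≠ [] →
      (∀ x, x ∈ visited ↔ x ∈ chain) →
      bfsLoop d fuel (pairsOf chain) visited [chain.getLastD ""] =
        pairsOf (extendChain d fuel chain) := by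
  induction fuel with
  | zero => intro chain visited _ _; rfl
  | succ f ih =>
    intro chain visited hne hv
    simp only [bfsLoop, extendChain]
    cases h : d.get? (chain.getLastD "") with
    | none => cases f <;> rfl
    | some dest =>
      by_cases hc : dest ≠ "" ∧ ¬ (dest ∈ chain)
      · have hc' : dest ≠ "" ∧ ¬ (dest ∈ visited) := ⟨hc.1, fun hm => hc.2 ((hv dest).mp hm)⟩
        simp only [if_pos hc, if_pos hc']
        have hlast : (chain ++ [dest]).getLastD "" = dest := by simp
        have := ih (chain ++ [dest]) (visited.add dest) (by simp)
          (by intro x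
              simp only [PySem.Set.mem_add, hv, List.mem_append, List.mem_singleton])
        rw [pairsOf_append chain dest hne, hlast] at this
        exact this
      · have hc' : ¬ (dest ≠ "" ∧ ¬ (dest ∈ visited)) := by
          intro ⟨h1, h2⟩; exact hc ⟨h1, fun hm => h2 ((hv dest).mpr hm)⟩
        simp only [if_neg hc, if_neg hc']

-- ===== VERDICT =====
theorem bfs_spec : Claim_equal_bfs := by
  intro planes state _
  unfold Spec_bfs bfs bfs_alt
  have := loop_eq_chain (PySem.Dict.ofList planes) (planes.length + 1) [state]
    (PySem.Set.add PySem.Set.empty state) (by simp)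
    (by intro x; simp [PySem.Set.empty])
  simpa [pairsOf] using this
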